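-- pv_equiv track=rewrite | github.com/yingshaoxo/yingshaoxo_txt_data | super_completor.py | use_feature_based_dict_to_get_next_text
-- ===== SOURCE A (Python) =====
-- def use_feature_based_dict_to_get_next_text(root_dict, input_text, how_many_character_you_want=64, max_previous_char_number=256):
--     def the_real_function(the_input_text, the_level):
--         while the_level >= 1:
--             right_side_sub_string = the_input_text[-the_level:]
--             the_next_value = root_dict.get(right_side_sub_string)
--             if the_next_value != None:
--                 return the_next_value
--             the_level -= 1
--         return None
--
--     response = ""
--     while len(response) < how_many_character_you_want:
--         temp_response = the_real_function(input_text, max_previous_char_number)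
--         if temp_response == None:
--             break
--         response += temp_response
--         input_text += temp_response
--
--     return response
-- ===== SOURCE B (Python) =====
-- def use_feature_based_dict_to_get_next_text(root_dict, input_text, how_many_character_you_want=64, max_previous_char_number=256):
--     def find_next(text):
--         best_key = None
--         best_value = None
--         for key, value in root_dict.items():
--             if 1 <= len(key) <= max_previous_char_number and text.endswith(key):
--                 if best_key is None or len(key) > len(best_key):
--                     best_key, best_value = key, value
--         return best_value
--
--     response = ""
--     while len(response) < how_many_character_you_want:
--         piece = find_next(input_text)
--         if piece is None:
--             break
--         response += piece
--         input_text += piece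
--     return response
-- ===== Notes on version B (the rewrite author's own statement) =====
-- stated objective: alternative
-- what changed: The inner search is inverted: instead of probing up to max_previous_char_number suffix lengths per generated piece against the dict, B makes one pass over the dict items keeping the longest nonempty key within the length cap that is a suffix of the current text; Pre_ excludes dicts that bind the empty string as a VALUE to a key short enough to match, on which A's loop can run forever.
-- intended difference: When input_text is empty, a positive count is requested, the cap is at least 1 and root_dict binds the empty-string key, A starts its output with that key's value (the slice ''[-l:] is '' so the lookup hits) while B returns continuations built from nonempty suffix keys only ('' here); an empty key matching only the empty text is an artefact of Python slicing, so B's reading of keys as real suffix features is the intended one. — e.g. on use_feature_based_dict_to_get_next_text([("", "x")], "", 1, 1): A returns "x", B returns ""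
-- outside the precondition, e.g. on use_feature_based_dict_to_get_next_text({'': 'y', '9': ''}, '', 2, 1): A returns 'y', B returns ''; on use_feature_based_dict_to_get_next_text({'a': ''}, 'b', 1, 1): A returns '', B returns ''
import Mathlib
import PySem

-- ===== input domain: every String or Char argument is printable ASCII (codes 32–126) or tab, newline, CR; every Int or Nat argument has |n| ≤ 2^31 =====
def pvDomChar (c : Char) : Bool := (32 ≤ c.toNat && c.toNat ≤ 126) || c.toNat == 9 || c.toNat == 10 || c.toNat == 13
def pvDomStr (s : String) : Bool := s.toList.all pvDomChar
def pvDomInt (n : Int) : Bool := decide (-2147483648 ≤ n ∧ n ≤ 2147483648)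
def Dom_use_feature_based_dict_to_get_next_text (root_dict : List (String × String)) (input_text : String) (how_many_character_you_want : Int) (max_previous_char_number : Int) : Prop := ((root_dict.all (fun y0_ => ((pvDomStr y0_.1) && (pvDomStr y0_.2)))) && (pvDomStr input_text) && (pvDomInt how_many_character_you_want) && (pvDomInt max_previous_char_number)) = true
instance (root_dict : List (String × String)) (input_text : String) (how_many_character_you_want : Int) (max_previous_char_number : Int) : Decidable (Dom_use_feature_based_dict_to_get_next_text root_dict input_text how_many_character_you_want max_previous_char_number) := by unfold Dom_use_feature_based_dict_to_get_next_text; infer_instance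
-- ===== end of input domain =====

-- B inverts A's inner search: instead of probing up to max_previous_char_number suffix lengths against the
-- dict per generated piece, B scans the dict items once, keeping the longest nonempty capped key that is a
-- suffix of the text (a different traversal of the same data; no argument is mutated by either Python).

-- ===== PORT A =====
-- root_dict.get(k): first matching binding in the association list (dict convention)
def pvDictGet (d : List (String × String)) (k : String) : Option String :=
  match d with
  | [] => none
  | (a, b) :: rest => if a == k then some b else pvDictGet rest k

-- the_real_function: while the_level >= 1: probe the_input_text[-the_level:]; else level -= 1
def pvRealFunction (root_dict : List (String × String)) (the_input_text : List Char) (the_level : Int) : Option String :=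
  if 1 ≤ the_level then
    match pvDictGet root_dict (String.ofList (PySem.List.slice the_input_text (some (-the_level)) none)) with
    | some v => some v
    | none => pvRealFunction root_dict the_input_text (the_level - 1)
  else none
termination_by the_level.toNat
decreasing_by omega

-- while len(response) < how_many_character_you_want: …  (fuel = want.toNat bounds the iterations:
-- inside Pre_ every appended piece is nonempty, so the while-condition is already false when fuel runs out)
def pvGenLoopA (root_dict : List (String × String)) (want maxp : Int) : Nat → List Char → List Char → List Char
  | 0, _, response => response
  | fuel + 1, input_text, response =>
    if (response.length : Int) < want then
      match pvRealFunction root_dict input_text maxp with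
      | none => response
      | some v => pvGenLoopA root_dict want maxp fuel (input_text ++ v.toList) (response ++ v.toList)
    else response

def use_feature_based_dict_to_get_next_text (root_dict : List (String × String)) (input_text : String) (how_many_character_you_want : Int) (max_previous_char_number : Int) : String :=
  String.ofList (pvGenLoopA root_dict how_many_character_you_want max_previous_char_number how_many_character_you_want.toNat input_text.toList [])

-- ===== PORT B =====
-- candidate test: 1 <= len(key) <= max_previous_char_number and text.endswith(key)
def pvCond (text : List Char) (maxp : Int) (k : String) : Bool :=
  decide (1 ≤ k.toList.length) && decide ((k.toList.length : Int) ≤ maxp) && PySem.Chars.endswith text k.toList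

-- loop body of find_next: keep the first longest matching (key, value)
def pvBestStep (text : List Char) (maxp : Int) (best : Option (String × String)) (kv : String × String) : Option (String × String) :=
  if pvCond text maxp kv.1 then
    match best with
    | none => some kv
    | some b => if b.1.toList.length < kv.1.toList.length then some kv else best
  else best

def pvFindNext (root_dict : List (String × String)) (text : List Char) (maxp : Int) : Option String :=
  (root_dict.foldl (pvBestStep text maxp) none).map (·.2)

def pvGenLoopB (root_dict : List (String × String)) (want maxp : Int) : Nat → List Char → List Char → List Char
  | 0, _, response => response
  | fuel + 1, input_text, response =>
    if (response.length : Int) < want then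
      match pvFindNext root_dict input_text maxp with
      | none => response
      | some v => pvGenLoopB root_dict want maxp fuel (input_text ++ v.toList) (response ++ v.toList)
    else response

def use_feature_based_dict_to_get_next_text_alt (root_dict : List (String × String)) (input_text : String) (how_many_character_you_want : Int) (max_previous_char_number : Int) : String :=
  String.ofList (pvGenLoopB root_dict how_many_character_you_want max_previous_char_number how_many_character_you_want.toNat input_text.toList [])

-- ===== PRECONDITION & SPEC =====
-- Pre_ excludes dicts that bind an empty-string VALUE to a key short enough to be matched
-- (len(key) <= max_previous_char_number) when a positive character count is requested and the cap is
-- at least 1: on such inputs Python A can loop forever (response += "" makes no progress), so A need not return.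
def Pre_use_feature_based_dict_to_get_next_text (root_dict : List (String × String)) (input_text : String) (how_many_character_you_want : Int) (max_previous_char_number : Int) : Prop :=
  how_many_character_you_want ≤ 0 ∨ max_previous_char_number < 1 ∨
    ∀ kv ∈ root_dict, kv.2 = "" → max_previous_char_number < (kv.1.toList.length : Int)
instance (root_dict : List (String × String)) (input_text : String) (how_many_character_you_want : Int) (max_previous_char_number : Int) : Decidable (Pre_use_feature_based_dict_to_get_next_text root_dict input_text how_many_character_you_want max_previous_char_number) := by unfold Pre_use_feature_based_dict_to_get_next_text; infer_instance

def pvWitness_use_feature_based_dict_to_get_next_text : (List (String × String)) × String × Int × Int := ([("a", "b")], "a", 3, 2)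

-- When input_text is empty, a positive count is requested, the cap is at least 1 and root_dict binds the
-- empty-string key, A starts its output with that key's value (the slice ''[-l:] is '' so the lookup hits)
-- while B builds its continuation from nonempty suffix keys only (here returning ""); an empty key that
-- matches only the empty text is an artefact of Python slicing, so B's reading of keys as real suffix
-- features is the intended behaviour.
def D_use_feature_based_dict_to_get_next_text (root_dict : List (String × String)) (input_text : String) (how_many_character_you_want : Int) (max_previous_char_number : Int) : Prop :=
  input_text = "" ∧ 0 < how_many_character_you_want ∧ 1 ≤ max_previous_char_number ∧ ∃ kv ∈ root_dict, kv.1 = ""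
instance (root_dict : List (String × String)) (input_text : String) (how_many_character_you_want : Int) (max_previous_char_number : Int) : Decidable (D_use_feature_based_dict_to_get_next_text root_dict input_text how_many_character_you_want max_previous_char_number) := by unfold D_use_feature_based_dict_to_get_next_text; infer_instance

def Spec_use_feature_based_dict_to_get_next_text (root_dict : List (String × String)) (input_text : String) (how_many_character_you_want : Int) (max_previous_char_number : Int) (out : String) : Prop := ¬ D_use_feature_based_dict_to_get_next_text root_dict input_text how_many_character_you_want max_previous_char_number → out = use_feature_based_dict_to_get_next_text_alt root_dict input_text how_many_character_you_want max_previous_char_number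
instance (root_dict : List (String × String)) (input_text : String) (how_many_character_you_want : Int) (max_previous_char_number : Int) (out : String) : Decidable (Spec_use_feature_based_dict_to_get_next_text root_dict input_text how_many_character_you_want max_previous_char_number out) := by unfold Spec_use_feature_based_dict_to_get_next_text; infer_instance

def pvDiffWitness_use_feature_based_dict_to_get_next_text : (List (String × String)) × String × Int × Int := ([("", "x")], "", 1, 1)
def pvDiffWitnessOut_use_feature_based_dict_to_get_next_text : String × String := ("x", "")

-- ===== CLAIM (what is proved, stated in full; the proofs are below) =====
def Claim_unchanged_use_feature_based_dict_to_get_next_text : Prop := ∀ (root_dict : List (String × String)) (input_text : String) (how_many_character_you_want : Int) (max_previous_char_number : Int), Dom_use_feature_based_dict_to_get_next_text root_dict input_text how_many_character_you_want max_previous_char_number → Pre_use_feature_based_dict_to_get_next_text root_dict input_text how_many_character_you_want max_previous_char_number → Spec_use_feature_based_dict_to_get_next_text root_dict input_text how_many_character_you_want max_previous_char_number (use_feature_based_dict_to_get_next_text root_dict input_text how_many_character_you_want max_previous_char_number)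
def Claim_changed_use_feature_based_dict_to_get_next_text : Prop := Dom_use_feature_based_dict_to_get_next_text (pvDiffWitness_use_feature_based_dict_to_get_next_text.1) (pvDiffWitness_use_feature_based_dict_to_get_next_text.2.1) (pvDiffWitness_use_feature_based_dict_to_get_next_text.2.2.1) (pvDiffWitness_use_feature_based_dict_to_get_next_text.2.2.2) ∧ Pre_use_feature_based_dict_to_get_next_text (pvDiffWitness_use_feature_based_dict_to_get_next_text.1) (pvDiffWitness_use_feature_based_dict_to_get_next_text.2.1) (pvDiffWitness_use_feature_based_dict_to_get_next_text.2.2.1) (pvDiffWitness_use_feature_based_dict_to_get_next_text.2.2.2) ∧ D_use_feature_based_dict_to_get_next_text (pvDiffWitness_use_feature_based_dict_to_get_next_text.1) (pvDiffWitness_use_feature_based_dict_to_get_next_text.2.1) (pvDiffWitness_use_feature_based_dict_to_get_next_text.2.2.1) (pvDiffWitness_use_feature_based_dict_to_get_next_text.2.2.2) ∧ use_feature_based_dict_to_get_next_text (pvDiffWitness_use_feature_based_dict_to_get_next_text.1) (pvDiffWitness_use_feature_based_dict_to_get_next_text.2.1) (pvDiffWitness_use_feature_based_dict_to_get_next_text.2.2.1)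 (pvDiffWitness_use_feature_based_dict_to_get_next_text.2.2.2) = pvDiffWitnessOut_use_feature_based_dict_to_get_next_text.1 ∧ use_feature_based_dict_to_get_next_text_alt (pvDiffWitness_use_feature_based_dict_to_get_next_text.1) (pvDiffWitness_use_feature_based_dict_to_get_next_text.2.1) (pvDiffWitness_use_feature_based_dict_to_get_next_text.2.2.1) (pvDiffWitness_use_feature_based_dict_to_get_next_text.2.2.2) = pvDiffWitnessOut_use_feature_based_dict_to_get_next_text.2 ∧ pvDiffWitnessOut_use_feature_based_dict_to_get_next_text.1 ≠ pvDiffWitnessOut_use_feature_based_dict_to_get_next_text.2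
def Claim_exact_use_feature_based_dict_to_get_next_text : Prop := ∀ (root_dict : List (String × String)) (input_text : String) (how_many_character_you_want : Int) (max_previous_char_number : Int), Dom_use_feature_based_dict_to_get_next_text root_dict input_text how_many_character_you_want max_previous_char_number → Pre_use_feature_based_dict_to_get_next_text root_dict input_text how_many_character_you_want max_previous_char_number → D_use_feature_based_dict_to_get_next_text root_dict input_text how_many_character_you_want max_previous_char_number → use_feature_based_dict_to_get_next_text root_dict input_text how_many_character_you_want max_previous_char_number ≠ use_feature_based_dict_to_get_next_text_alt root_dict input_text how_many_character_you_want max_previous_char_number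

-- ===== LEMMAS AND PROOFS =====

-- the suffix of `t` probed at level `l`
def pvKeyAt (t : List Char) (l : Int) : List Char := t.drop (t.length - l.toNat)

theorem pvDictGet_eq_none_iff (d : List (String × String)) (k : String) :
    pvDictGet d k = none ↔ ∀ v, (k, v) ∉ d := by
  induction d with
  | nil => simp [pvDictGet]
  | cons p rest ih =>
    obtain ⟨a, b⟩ := p
    by_cases h : a = k
    · subst h; simp [pvDictGet]
      exact ⟨b, fun hb => absurd rfl hb⟩
    · simp only [pvDictGet, beq_iff_eq, h, if_false, ih, List.mem_cons]
      constructor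
      · intro hall v hv
        rcases hv with hv | hv
        · exact h (congrArg Prod.fst hv).symm
        · exact hall v hv
      · intro hall v hv
        exact hall v (Or.inr hv)

theorem pvDictGet_eq_some_mem (d : List (String × String)) (k v : String)
    (h : pvDictGet d k = some v) : (k, v) ∈ d := by
  induction d with
  | nil => simp [pvDictGet] at h
  | cons p rest ih =>
    obtain ⟨a, b⟩ := p
    by_cases ha : a = k
    · subst ha
      simp [pvDictGet] at h
      simp [h]
    · simp [pvDictGet, ha] at h
      exact List.mem_cons_of_mem _ (ih h)

theorem pvDictGet_append_singleton (d : List (String × String)) (p : String × String) (k : String) :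
    pvDictGet (d ++ [p]) k =
      match pvDictGet d k with
      | some v => some v
      | none => if p.1 == k then some p.2 else none := by
  induction d with
  | nil => simp [pvDictGet]
  | cons q rest ih =>
    obtain ⟨a, b⟩ := q
    by_cases ha : a = k
    · subst ha; simp [pvDictGet]
    · simp [pvDictGet, ha, ih]

theorem pvSlice_neg (t : List Char) (l : Int) (hl : 1 ≤ l) :
    PySem.List.slice t (some (-l)) none = pvKeyAt t l := by
  rw [PySem.List.slice_some_none]
  unfold pvKeyAt
  congr 1
  simp only [PySem.List.clampIdx]
  split_ifs <;> omega

theorem pvKeyAt_suffix (t : List Char) (l : Int) : pvKeyAt t l <:+ t := by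
  exact List.drop_suffix _ _

theorem pvKeyAt_length (t : List Char) (l : Int) :
    (pvKeyAt t l).length = min l.toNat t.length := by
  simp [pvKeyAt]
  omega

-- pvCond characterises exactly the keys A probes on a NONEMPTY text (levels 1..maxp)
theorem pvCond_iff (t : List Char) (maxp : Int) (k : String) (ht : t ≠ []) :
    pvCond t maxp k = true ↔ ∃ l : Int, 1 ≤ l ∧ l ≤ maxp ∧ k.toList = pvKeyAt t l := by
  constructor
  · intro h
    simp only [pvCond, Bool.and_eq_true, decide_eq_true_eq, PySem.Chars.endswith_iff] at h
    obtain ⟨⟨h1, hlen⟩, hsuf⟩ := h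
    refine ⟨(k.toList.length : Int), by omega, hlen, ?_⟩
    obtain ⟨p, hp⟩ := hsuf
    have hlt : t.length = p.length + k.toList.length := by
      rw [← hp]; simp
    unfold pvKeyAt
    have he : t.length - ((k.toList.length : Int)).toNat = p.length := by omega
    rw [he, ← hp, List.drop_left]
  · rintro ⟨l, hl1, hl2, hk⟩
    simp only [pvCond, Bool.and_eq_true, decide_eq_true_eq, PySem.Chars.endswith_iff]
    have hlen := pvKeyAt_length t l
    have ht0 : 0 < t.length := List.length_pos_iff.mpr ht
    refine ⟨⟨?_, ?_⟩, ?_⟩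
    · rw [hk, hlen]; omega
    · rw [hk, hlen]; omega
    · rw [hk]; exact pvKeyAt_suffix t l

-- on the empty text no key is a candidate (a candidate key is nonempty)
theorem pvCond_nil (maxp : Int) (k : String) : pvCond [] maxp k = false := by
  by_cases h : k.toList = []
  · simp [pvCond, h]
  · have he : PySem.Chars.endswith [] k.toList = false := by
      cases hc : PySem.Chars.endswith [] k.toList with
      | false => rfl
      | true =>
        rw [PySem.Chars.endswith_iff] at hc
        exact absurd (List.suffix_nil.mp hc) h
    simp [pvCond, he]

-- a cap below 1 rules out every key
theorem pvCond_low (t : List Char) (maxp : Int) (hm : maxp < 1) (k : String) :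
    pvCond t maxp k = false := by
  cases hc : pvCond t maxp k with
  | false => rfl
  | true =>
    simp only [pvCond, Bool.and_eq_true, decide_eq_true_eq] at hc
    omega

-- two candidate keys of equal length are equal (both suffixes of t)
theorem pvCond_len_inj (t : List Char) (maxp : Int) (k1 k2 : String)
    (h1 : pvCond t maxp k1 = true) (h2 : pvCond t maxp k2 = true)
    (hlen : k1.toList.length = k2.toList.length) : k1 = k2 := by
  simp only [pvCond, Bool.and_eq_true, decide_eq_true_eq, PySem.Chars.endswith_iff] at h1 h2
  obtain ⟨p1, hp1⟩ := h1.2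
  obtain ⟨p2, hp2⟩ := h2.2
  have hp : p1 ++ k1.toList = p2 ++ k2.toList := hp1.trans hp2.symm
  have hplen : p1.length = p2.length := by
    have l1 := congrArg List.length hp1
    have l2 := congrArg List.length hp2
    rw [List.length_append] at l1 l2
    omega
  have := (List.append_inj hp hplen).2
  exact String.toList_inj.mp this

theorem pvBestStep_none (t : List Char) (maxp : Int) (kv : String × String)
    (h : pvCond t maxp kv.1 = true) : pvBestStep t maxp none kv = some kv := by
  unfold pvBestStep
  rw [if_pos h]

theorem pvBestStep_skip (t : List Char) (maxp : Int) (b : Option (String × String))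
    (kv : String × String) (h : pvCond t maxp kv.1 = false) : pvBestStep t maxp b kv = b := by
  unfold pvBestStep
  rw [if_neg (by simp [h])]

theorem pvBestStep_some_lt (t : List Char) (maxp : Int) (b kv : String × String)
    (h : pvCond t maxp kv.1 = true) (hlt : b.1.toList.length < kv.1.toList.length) :
    pvBestStep t maxp (some b) kv = some kv := by
  unfold pvBestStep
  rw [if_pos h]
  show (if b.1.toList.length < kv.1.toList.length then some kv else some b) = some kv
  rw [if_pos hlt]

theorem pvBestStep_some_ge (t : List Char) (maxp : Int) (b kv : String × String)
    (h : pvCond t maxp kv.1 = true) (hge : ¬ b.1.toList.length < kv.1.toList.length) :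
    pvBestStep t maxp (some b) kv = some b := by
  unfold pvBestStep
  rw [if_pos h]
  show (if b.1.toList.length < kv.1.toList.length then some kv else some b) = some b
  rw [if_neg hge]

-- the fold of pvBestStep returns the first binding of the longest candidate key
theorem pvFoldB_char (t : List Char) (maxp : Int) (d : List (String × String)) :
    (d.foldl (pvBestStep t maxp) none = none ∧ ∀ kv ∈ d, pvCond t maxp kv.1 = false)
    ∨ ∃ k v, d.foldl (pvBestStep t maxp) none = some (k, v) ∧ pvCond t maxp k = true ∧
        pvDictGet d k = some v ∧
        ∀ kv ∈ d, pvCond t maxp kv.1 = true → kv.1.toList.length ≤ k.toList.length := by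
  induction d using List.reverseRecOn with
  | nil => left; simp
  | append_singleton d p ih =>
    obtain ⟨pk, pv⟩ := p
    rw [List.foldl_append, List.foldl_cons, List.foldl_nil]
    by_cases hc : pvCond t maxp pk = true
    · rcases ih with ⟨hnone, hall⟩ | ⟨k, v, hsome, hcond, hget, hmaxlen⟩
      · -- nothing matched in d; (pk, pv) is the first match
        right
        refine ⟨pk, pv, ?_, hc, ?_, ?_⟩
        · rw [hnone, pvBestStep_none t maxp (pk, pv) hc]
        · have hdnone : pvDictGet d pk = none := by
            rw [pvDictGet_eq_none_iff]
            intro w hw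
            have h2 := hall (pk, w) hw
            simp only at h2
            rw [h2] at hc
            exact absurd hc (by simp)
          rw [pvDictGet_append_singleton, hdnone]
          simp
        · intro kv hkv hkvc
          rcases List.mem_append.mp hkv with hkv | hkv
          · rw [hall kv hkv] at hkvc
            exact absurd hkvc (by simp)
          · simp at hkv; subst hkv; exact le_refl _
      · rw [hsome]
        by_cases hlt : k.toList.length < pk.toList.length
        · -- (pk, pv) beats the best binding of d
          right
          refine ⟨pk, pv, ?_, hc, ?_, ?_⟩
          · exact pvBestStep_some_lt t maxp (k, v) (pk, pv) hc hlt
          · have hdnone : pvDictGet d pk = none := by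
              cases hq : pvDictGet d pk with
              | none => rfl
              | some w =>
                have hmem := pvDictGet_eq_some_mem d pk w hq
                have := hmaxlen (pk, w) hmem hc
                simp only at this
                omega
            rw [pvDictGet_append_singleton, hdnone]
            simp
          · intro kv hkv hkvc
            rcases List.mem_append.mp hkv with hkv | hkv
            · exact le_of_lt (lt_of_le_of_lt (hmaxlen kv hkv hkvc) hlt)
            · simp at hkv; subst hkv; exact le_refl _
        · -- keep the best binding of d
          right
          refine ⟨k, v, ?_, hcond, ?_, ?_⟩
          · exact pvBestStep_some_ge t maxp (k, v) (pk, pv) hc hlt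
          · rw [pvDictGet_append_singleton, hget]
          · intro kv hkv hkvc
            rcases List.mem_append.mp hkv with hkv | hkv
            · exact hmaxlen kv hkv hkvc
            · simp at hkv; subst hkv; simp only at hkvc ⊢; omega
    · have hc' : pvCond t maxp pk = false := by simpa using hc
      rcases ih with ⟨hnone, hall⟩ | ⟨k, v, hsome, hcond, hget, hmaxlen⟩
      · left
        refine ⟨by rw [hnone, pvBestStep_skip t maxp none (pk, pv) hc'], ?_⟩
        intro kv hkv
        rcases List.mem_append.mp hkv with hkv | hkv
        · exact hall kv hkv
        · simp at hkv; subst hkv; exact hc'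
      · right
        refine ⟨k, v, by rw [hsome, pvBestStep_skip t maxp (some (k, v)) (pk, pv) hc'], hcond, ?_, ?_⟩
        · rw [pvDictGet_append_singleton, hget]
        · intro kv hkv hkvc
          rcases List.mem_append.mp hkv with hkv | hkv
          · exact hmaxlen kv hkv hkvc
          · simp at hkv; subst hkv
            rw [hc'] at hkvc
            exact absurd hkvc (by simp)

-- a fold with no candidate stays none
theorem pvFold_none (t : List Char) (maxp : Int) (d : List (String × String))
    (h : ∀ kv ∈ d, pvCond t maxp kv.1 = false) :
    d.foldl (pvBestStep t maxp) none = none := by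
  rcases pvFoldB_char t maxp d with ⟨hn, _⟩ | ⟨k, v, _, hcond, hget, _⟩
  · exact hn
  · have := h (k, v) (pvDictGet_eq_some_mem d k v hget)
    simp only at this
    rw [this] at hcond
    cases hcond

theorem pvFindNext_nil (d : List (String × String)) (maxp : Int) :
    pvFindNext d [] maxp = none := by
  unfold pvFindNext
  rw [pvFold_none [] maxp d (fun kv _ => pvCond_nil maxp kv.1)]
  rfl

theorem pvFindNext_low (d : List (String × String)) (t : List Char) (maxp : Int) (hm : maxp < 1) :
    pvFindNext d t maxp = none := by
  unfold pvFindNext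
  rw [pvFold_none t maxp d (fun kv _ => pvCond_low t maxp hm kv.1)]
  rfl

-- A's probe on the empty text only ever looks up "" 
theorem pvRealFunction_nil_aux (d : List (String × String)) (h : pvDictGet d "" = none) :
    ∀ (n : Nat) (l : Int), l.toNat = n → pvRealFunction d [] l = none := by
  intro n
  induction n with
  | zero =>
    intro l hl
    rw [pvRealFunction]
    rw [if_neg (by omega)]
  | succ n ih =>
    intro l hl
    have hl1 : 1 ≤ l := by omega
    rw [pvRealFunction, if_pos hl1, pvSlice_neg [] l hl1]
    have hk : pvKeyAt [] l = [] := by simp [pvKeyAt]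
    rw [hk]
    have : String.ofList ([] : List Char) = "" := rfl
    rw [this, h]
    exact ih (l - 1) (by omega)

theorem pvRealFunction_nil (d : List (String × String)) (h : pvDictGet d "" = none) (l : Int) :
    pvRealFunction d [] l = none :=
  pvRealFunction_nil_aux d h l.toNat l rfl

-- A's descending probe equals B's fold (main inner lemma, by induction on the level)
theorem pvRealFn_eq_fold (d : List (String × String)) (t : List Char) (maxp : Int)
    (hmax : 1 ≤ maxp) (ht : t ≠ []) : ∀ (n : Nat), (n : Int) ≤ maxp →
    (∀ l' : Int, (n : Int) < l' → l' ≤ maxp → pvDictGet d (String.ofList (pvKeyAt t l')) = none) →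
    pvRealFunction d t (n : Int) = pvFindNext d t maxp := by
  intro n
  induction n with
  | zero =>
    intro _ hblock
    have hA : pvRealFunction d t ((0 : Nat) : Int) = none := by
      rw [pvRealFunction]; simp
    rw [hA]
    rcases pvFoldB_char t maxp d with ⟨hnone, _⟩ | ⟨k, v, hsome, hcond, hget, _⟩
    · simp [pvFindNext, hnone]
    · exfalso
      obtain ⟨l, hl1, hl2, hk⟩ := (pvCond_iff t maxp k ht).mp hcond
      have hb := hblock l (by omega) hl2
      rw [← hk] at hb
      simp only [String.ofList_toList] at hb
      rw [hb] at hget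
      cases hget
  | succ n ih =>
    intro hle hblock
    have h1 : (1 : Int) ≤ ((n + 1 : Nat) : Int) := by push_cast; omega
    rw [pvRealFunction, if_pos h1, pvSlice_neg t ((n + 1 : Nat) : Int) h1]
    cases hK : pvDictGet d (String.ofList (pvKeyAt t ((n + 1 : Nat) : Int))) with
    | some w =>
      have hmem := pvDictGet_eq_some_mem _ _ _ hK
      have hcondK : pvCond t maxp (String.ofList (pvKeyAt t ((n + 1 : Nat) : Int))) = true := by
        rw [pvCond_iff t maxp _ ht]
        exact ⟨((n + 1 : Nat) : Int), h1, hle, by simp⟩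
      rcases pvFoldB_char t maxp d with ⟨_, hall⟩ | ⟨k, v, hsome, hcond, hget, hmaxlen⟩
      · have := hall (String.ofList (pvKeyAt t ((n + 1 : Nat) : Int)), w) hmem
        simp only at this
        rw [this] at hcondK
        cases hcondK
      · have hlen1 : (String.ofList (pvKeyAt t ((n + 1 : Nat) : Int))).toList.length ≤ k.toList.length :=
          hmaxlen (String.ofList (pvKeyAt t ((n + 1 : Nat) : Int)), w) hmem hcondK
        obtain ⟨l0, hl01, hl02, hk0⟩ := (pvCond_iff t maxp k ht).mp hcond
        have hlen2 : k.toList.length ≤ (String.ofList (pvKeyAt t ((n + 1 : Nat) : Int))).toList.length := by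
          by_cases hcase : l0 ≤ ((n + 1 : Nat) : Int)
          · rw [hk0, pvKeyAt_length]
            simp only [String.toList_ofList, pvKeyAt_length]
            have hc1 : ((n + 1 : Nat) : Int).toNat = n + 1 := by omega
            rw [hc1]
            omega
          · exfalso
            have hb := hblock l0 (by omega) hl02
            rw [← hk0] at hb
            simp only [String.ofList_toList] at hb
            rw [hb] at hget
            cases hget
        have hkK : k = String.ofList (pvKeyAt t ((n + 1 : Nat) : Int)) :=
          pvCond_len_inj t maxp k _ hcond hcondK (le_antisymm hlen2 hlen1)
        rw [hkK, hK] at hget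
        have hvw : v = w := (Option.some.inj hget).symm
        show some w = pvFindNext d t maxp
        simp [pvFindNext, hsome, hvw]
    | none =>
      show pvRealFunction d t (((n + 1 : Nat) : Int) - 1) = pvFindNext d t maxp
      have e : ((n + 1 : Nat) : Int) - 1 = (n : Int) := by push_cast; ring
      rw [e]
      apply ih (by omega)
      intro l' hl1' hl2'
      by_cases hl : l' = ((n + 1 : Nat) : Int)
      · rw [hl]; exact hK
      · exact hblock l' (by omega) hl2'

-- inner equality on a nonempty text, and on any text when "" is unbound
theorem pvInner_eq (d : List (String × String)) (t : List Char) (maxp : Int) (hmax : 1 ≤ maxp)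
    (hok : t ≠ [] ∨ pvDictGet d "" = none) :
    pvRealFunction d t maxp = pvFindNext d t maxp := by
  by_cases ht : t = []
  · rcases hok with h | h
    · exact absurd ht h
    · rw [ht, pvRealFunction_nil d h maxp, pvFindNext_nil]
  · have e : ((maxp.toNat : Nat) : Int) = maxp := by omega
    have hblock : ∀ l' : Int, ((maxp.toNat : Nat) : Int) < l' → l' ≤ maxp →
        pvDictGet d (String.ofList (pvKeyAt t l')) = none := by
      intro l' h1 h2
      exact absurd h2 (by omega)
    have h := pvRealFn_eq_fold d t maxp hmax ht maxp.toNat (by omega) hblock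
    rw [e] at h
    exact h

-- the two generation loops agree when the starting text is nonempty
theorem pvLoop_eq_ne (d : List (String × String)) (want maxp : Int) (hmax : 1 ≤ maxp) :
    ∀ (fuel : Nat) (text resp : List Char), text ≠ [] →
      pvGenLoopA d want maxp fuel text resp = pvGenLoopB d want maxp fuel text resp := by
  intro fuel
  induction fuel with
  | zero => intro text resp _; rfl
  | succ fuel ih =>
    intro text resp ht
    simp only [pvGenLoopA, pvGenLoopB]
    rw [pvInner_eq d text maxp hmax (Or.inl ht)]
    by_cases hw : (resp.length : Int) < want
    · rw [if_pos hw, if_pos hw]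
      cases hf : pvFindNext d text maxp with
      | none => rfl
      | some v => exact ih _ _ (by simp [ht])
    · rw [if_neg hw, if_neg hw]

-- … and on any text when "" is not a key of the dict
theorem pvLoop_eq_noempty (d : List (String × String)) (want maxp : Int) (hmax : 1 ≤ maxp)
    (hd : pvDictGet d "" = none) :
    ∀ (fuel : Nat) (text resp : List Char),
      pvGenLoopA d want maxp fuel text resp = pvGenLoopB d want maxp fuel text resp := by
  intro fuel
  induction fuel with
  | zero => intro text resp; rfl
  | succ fuel ih =>
    intro text resp
    simp only [pvGenLoopA, pvGenLoopB]
    rw [pvInner_eq d text maxp hmax (Or.inr hd)]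
    by_cases hw : (resp.length : Int) < want
    · rw [if_pos hw, if_pos hw]
      cases hf : pvFindNext d text maxp with
      | none => rfl
      | some v => exact ih _ _
    · rw [if_neg hw, if_neg hw]

theorem pvLoopA_low (d : List (String × String)) (want maxp : Int) (hmax : maxp < 1) :
    ∀ (fuel : Nat) (text : List Char), pvGenLoopA d want maxp fuel text [] = [] := by
  intro fuel
  induction fuel with
  | zero => intro text; rfl
  | succ fuel _ =>
    intro text
    have hrf : pvRealFunction d text maxp = none := by
      rw [pvRealFunction, if_neg (by omega)]
    simp only [pvGenLoopA, hrf]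
    split <;> rfl

theorem pvLoopB_low (d : List (String × String)) (want maxp : Int) (hmax : maxp < 1) :
    ∀ (fuel : Nat) (text : List Char), pvGenLoopB d want maxp fuel text [] = [] := by
  intro fuel
  induction fuel with
  | zero => intro text; rfl
  | succ fuel _ =>
    intro text
    simp only [pvGenLoopB, pvFindNext_low d text maxp hmax]
    split <;> rfl

-- B's loop on the empty text finds nothing
theorem pvLoopB_nil (d : List (String × String)) (want maxp : Int) :
    ∀ (fuel : Nat), pvGenLoopB d want maxp fuel [] [] = [] := by
  intro fuel
  cases fuel with
  | zero => rfl
  | succ fuel =>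
    simp only [pvGenLoopB, pvFindNext_nil d maxp]
    split <;> rfl

-- A's loop only ever extends its accumulator
theorem pvLoopA_prefix (d : List (String × String)) (want maxp : Int) :
    ∀ (fuel : Nat) (text resp : List Char),
      ∃ s, pvGenLoopA d want maxp fuel text resp = resp ++ s := by
  intro fuel
  induction fuel with
  | zero => intro text resp; exact ⟨[], by simp [pvGenLoopA]⟩
  | succ fuel ih =>
    intro text resp
    simp only [pvGenLoopA]
    by_cases hw : (resp.length : Int) < want
    · rw [if_pos hw]
      cases hf : pvRealFunction d text maxp with
      | none => exact ⟨[], by simp⟩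
      | some v =>
        obtain ⟨s, hs⟩ := ih (text ++ v.toList) (resp ++ v.toList)
        refine ⟨v.toList ++ s, ?_⟩
        show pvGenLoopA d want maxp fuel (text ++ v.toList) (resp ++ v.toList) = resp ++ (v.toList ++ s)
        rw [hs, List.append_assoc]
    · rw [if_neg hw]; exact ⟨[], by simp⟩

theorem pvOfList_ne_empty (l : List Char) (h : l ≠ []) : String.ofList l ≠ "" := by
  intro he
  have := congrArg String.toList he
  simp only [String.toList_ofList] at this
  exact h this

-- ===== VERDICT (by name: the statements are the Claim_ definitions above) =====
theorem use_feature_based_dict_to_get_next_text_spec : Claim_unchanged_use_feature_based_dict_to_get_next_text := by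
  intro root_dict input_text want maxp _hdom _hpre
  unfold Spec_use_feature_based_dict_to_get_next_text
  intro hnD
  unfold use_feature_based_dict_to_get_next_text use_feature_based_dict_to_get_next_text_alt
  by_cases hm : maxp < 1
  · rw [pvLoopA_low root_dict want maxp hm, pvLoopB_low root_dict want maxp hm]
  · have hm1 : 1 ≤ maxp := by omega
    by_cases hw : want ≤ 0
    · have h0 : want.toNat = 0 := by omega
      rw [h0]
      rfl
    · by_cases ht : input_text.toList = []
      · have hit : input_text = "" := by
          have := congrArg String.ofList ht
          simpa using this
        have hnk : pvDictGet root_dict "" = none := by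
          rw [pvDictGet_eq_none_iff]
          intro v hv
          exact hnD ⟨hit, by omega, hm1, ⟨("", v), hv, rfl⟩⟩
        rw [pvLoop_eq_noempty root_dict want maxp hm1 hnk]
      · rw [pvLoop_eq_ne root_dict want maxp hm1 _ _ _ ht]

-- pvRealFunction is well-founded recursion, so the witness value of A is computed by one manual unfolding
theorem pvRealFunction_wit : pvRealFunction [("", "x")] [] 1 = some "x" := by
  rw [pvRealFunction]
  decide

theorem use_feature_based_dict_to_get_next_text_changed : Claim_changed_use_feature_based_dict_to_get_next_text := by
  unfold Claim_changed_use_feature_based_dict_to_get_next_text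
  refine ⟨by decide, by decide, by decide, ?_, by decide, by decide⟩
  show use_feature_based_dict_to_get_next_text [("", "x")] "" 1 1 = "x"
  unfold use_feature_based_dict_to_get_next_text
  have h1 : (1 : Int).toNat = 1 := rfl
  have ht : ("" : String).toList = [] := rfl
  rw [h1, ht]
  show String.ofList (pvGenLoopA [("", "x")] 1 1 (0 + 1) [] []) = "x"
  simp only [pvGenLoopA, pvRealFunction_wit]
  decide

theorem use_feature_based_dict_to_get_next_text_tight : Claim_exact_use_feature_based_dict_to_get_next_text := by
  intro root_dict input_text want maxp _hdom hpre hD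
  obtain ⟨hit, hw, hm, kv, hkv, hk1⟩ := hD
  have hval : ∀ kv ∈ root_dict, kv.2 = "" → maxp < (kv.1.toList.length : Int) := by
    rcases hpre with h | h | h
    · omega
    · omega
    · exact h
  have ht : input_text.toList = [] := by rw [hit]; rfl
  -- B returns ""
  have hB : use_feature_based_dict_to_get_next_text_alt root_dict input_text want maxp = "" := by
    unfold use_feature_based_dict_to_get_next_text_alt
    rw [ht, pvLoopB_nil]
  -- A's first probe hits the "" binding
  have hmem0 : ("", kv.2) ∈ root_dict := by
    have : kv = ("", kv.2) := by
      cases kv; simp only at hk1; simp [hk1]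
    rw [← this]; exact hkv
  have hget : ∃ v₀, pvDictGet root_dict "" = some v₀ := by
    cases hg : pvDictGet root_dict "" with
    | none => exact absurd hmem0 ((pvDictGet_eq_none_iff root_dict "").mp hg kv.2)
    | some v₀ => exact ⟨v₀, rfl⟩
  obtain ⟨v₀, hg⟩ := hget
  have hv₀mem : ("", v₀) ∈ root_dict := pvDictGet_eq_some_mem root_dict "" v₀ hg
  have hv₀ne : v₀.toList ≠ [] := by
    intro hnil
    have hv0 : v₀ = "" := by
      have := congrArg String.ofList hnil
      simpa using this
    have hlt : maxp < (0 : Int) := by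
      have := hval ("", v₀) hv₀mem hv0
      simpa using this
    omega
  have hrf : pvRealFunction root_dict [] maxp = some v₀ := by
    rw [pvRealFunction, if_pos hm, pvSlice_neg [] maxp hm]
    have hk : pvKeyAt [] maxp = [] := by simp [pvKeyAt]
    rw [hk]
    have : String.ofList ([] : List Char) = "" := rfl
    rw [this, hg]
  -- A returns a string starting with v₀
  have hA : use_feature_based_dict_to_get_next_text root_dict input_text want maxp ≠ "" := by
    unfold use_feature_based_dict_to_get_next_text
    rw [ht]
    obtain ⟨n, hn⟩ : ∃ n, want.toNat = n + 1 := ⟨want.toNat - 1, by omega⟩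
    rw [hn]
    have hcond : (((([] : List Char)).length : Int) < want) := by simp; omega
    simp only [pvGenLoopA, if_pos hcond, hrf]
    obtain ⟨s, hs⟩ := pvLoopA_prefix root_dict want maxp n ([] ++ v₀.toList) ([] ++ v₀.toList)
    rw [hs]
    apply pvOfList_ne_empty
    simp [hv₀ne]
  rw [hB]
  exact hA
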